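-- pv_equiv track=rewrite | github.com/kokok22/Algorithm | SW Expert Academy/D2/1979.py | check
-- ===== SOURCE A (Python) =====
-- def check(mini_map, N, K):
--     total = 0
--     for i in range(N):
--         count_x = 0
--         count_y = 0
--
--         for j in range(N):
--             if mini_map[i][j]==1:
--                 count_x += 1
--             else:
--                 if count_x ==K:
--                     total +=1
--                 count_x = 0
--
--             if mini_map[j][i] == 1:
--                 count_y += 1
--
--             else:
--                 if count_y == K:
--                     total += 1
--                 count_y = 0
--
--         if count_x == K:
--             total += 1
--         if count_y == K:
--             total += 1
--
--     return total
-- ===== SOURCE B (Python) =====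
-- def check(mini_map, N, K):
--     def run_lengths(line):
--         # lengths of the segments obtained by splitting the line at every non-1 value
--         k = 0
--         while k < len(line) and line[k] == 1:
--             k += 1
--         if k == len(line):
--             return [k]
--         return [k] + run_lengths(line[k + 1:])
--
--     rows = [[mini_map[i][j] for j in range(N)] for i in range(N)]
--     cols = [[mini_map[j][i] for j in range(N)] for i in range(N)]
--     return sum(1 for line in rows + cols for L in run_lengths(line) if L == K)
-- ===== Notes on version B (the rewrite author's own statement) =====
-- stated objective: alternative
-- what changed: Replaces the fused double loop carrying two running counters and interleaved total updates by two separate passes (rows, then columns of the N x N block) that recursively split each line at every non-1 value into segment lengths and count the segments of length exactly K.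
import Mathlib
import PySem

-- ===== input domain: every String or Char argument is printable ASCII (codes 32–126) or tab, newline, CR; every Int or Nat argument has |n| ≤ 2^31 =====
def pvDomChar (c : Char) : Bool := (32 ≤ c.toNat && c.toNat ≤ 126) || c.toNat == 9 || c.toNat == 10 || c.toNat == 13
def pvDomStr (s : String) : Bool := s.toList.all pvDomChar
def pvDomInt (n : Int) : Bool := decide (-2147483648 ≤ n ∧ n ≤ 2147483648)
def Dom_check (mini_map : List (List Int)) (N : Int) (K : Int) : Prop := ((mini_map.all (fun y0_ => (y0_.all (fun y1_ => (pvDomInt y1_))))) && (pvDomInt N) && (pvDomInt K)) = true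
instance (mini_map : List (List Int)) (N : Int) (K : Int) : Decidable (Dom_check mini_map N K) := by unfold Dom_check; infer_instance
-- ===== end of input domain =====

-- B replaces A's fused two-counter scan by two split-into-segment-lengths passes (rows then columns); alternative decomposition, same cost.

-- ===== PORT A =====
-- shared indexing primitive mini_map[i][j]; the .getD defaults are never reached inside Pre_check
def pvIx (mini_map : List (List Int)) (i j : Int) : Int :=
  (PySem.List.pyGet? ((PySem.List.pyGet? mini_map i).getD []) j).getD 0

def check (mini_map : List (List Int)) (N : Int) (K : Int) : Int :=
  (PySem.List.pyRange 0 N 1).foldl (fun total i =>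
    let st := (PySem.List.pyRange 0 N 1).foldl (fun (st : Int × Int × Int) j =>
      let st1 := if pvIx mini_map i j = 1 then (st.1, st.2.1 + 1, st.2.2)
                 else (if st.2.1 = K then st.1 + 1 else st.1, 0, st.2.2)
      if pvIx mini_map j i = 1 then (st1.1, st1.2.1, st1.2.2 + 1)
      else (if st1.2.2 = K then st1.1 + 1 else st1.1, st1.2.1, 0)) (total, 0, 0)
    let total := if st.2.1 = K then st.1 + 1 else st.1
    if st.2.2 = K then total + 1 else total) 0

-- ===== PORT B =====
-- the while loop of run_lengths: length of the leading run of 1s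
def pvLead (line : List Int) : Nat :=
  match line with
  | [] => 0
  | v :: r => if v = 1 then pvLead r + 1 else 0

theorem pvLead_le (line : List Int) : pvLead line ≤ line.length := by
  induction line with
  | nil => simp [pvLead]
  | cons v r ih => simp only [pvLead, List.length_cons]; split <;> omega

-- run_lengths: segment lengths splitting at every non-1; line[k+1:] with k+1 ≥ 0 is List.drop (k+1)
def runLengths (line : List Int) : List Int :=
  if pvLead line = line.length then [(pvLead line : Int)]
  else (pvLead line : Int) :: runLengths (line.drop (pvLead line + 1))
termination_by line.length
decreasing_by
  have := pvLead_le line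
  simp only [List.length_drop]
  omega

def check_alt (mini_map : List (List Int)) (N : Int) (K : Int) : Int :=
  let R := PySem.List.pyRange 0 N 1
  let rows := R.map (fun i => R.map (fun j => pvIx mini_map i j))
  let cols := R.map (fun i => R.map (fun j => pvIx mini_map j i))
  (rows ++ cols).foldl (fun total line => total + ((runLengths line).count K : Int)) 0

-- ===== PRECONDITION & SPEC =====
-- Pre_check excludes exactly the inputs on which the Python A raises IndexError:
-- when N > 0 it needs the first N rows to exist and each to have at least N entries.
def Pre_check (mini_map : List (List Int)) (N : Int) (K : Int) : Prop :=
  0 < N → (N ≤ (mini_map.length : Int) ∧ ∀ row ∈ mini_map.take N.toNat, N ≤ (row.length : Int))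
instance (mini_map : List (List Int)) (N : Int) (K : Int) : Decidable (Pre_check mini_map N K) := by
  unfold Pre_check; infer_instance

def pvWitness_check : List (List Int) × Int × Int := ([[1, 0], [1, 1]], 2, 2)

def Spec_check (mini_map : List (List Int)) (N : Int) (K : Int) (out : Int) : Prop := out = check_alt mini_map N K
instance (mini_map : List (List Int)) (N : Int) (K : Int) (out : Int) : Decidable (Spec_check mini_map N K out) := by unfold Spec_check; infer_instance

-- ===== CLAIM (what is proved, stated in full; the proofs are below) =====
def Claim_equal_check : Prop := ∀ (mini_map : List (List Int)) (N : Int) (K : Int), Dom_check mini_map N K → Pre_check mini_map N K → Spec_check mini_map N K (check mini_map N K)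

-- ===== LEMMAS AND PROOFS =====

-- the single-counter step of A's scan over one line
def s1 (K : Int) (p : Int × Int) (v : Int) : Int × Int :=
  if v = 1 then (p.1, p.2 + 1) else (if p.2 = K then p.1 + 1 else p.1, 0)

theorem s1_add (K t c v : Int) : s1 K (t, c) v = (t + (s1 K (0, c) v).1, (s1 K (0, c) v).2) := by
  simp only [s1]; split_ifs <;> simp <;> ring

theorem foldl_s1_add (K : Int) (line : List Int) : ∀ (t c : Int),
    line.foldl (s1 K) (t, c) =
      (t + (line.foldl (s1 K) (0, c)).1, (line.foldl (s1 K) (0, c)).2) := by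
  induction line with
  | nil => intro t c; simp
  | cons v r ih =>
    intro t c
    simp only [List.foldl_cons]
    rw [s1_add, ih ((s1 K (0, c) v).1)]
    rw [show s1 K (0, c) v = ((s1 K (0, c) v).1, (s1 K (0, c) v).2) from rfl, ih]
    ring_nf

-- the segment lengths of a line, started with a partial run of length c
def runsP (c : Int) (line : List Int) : List Int :=
  match line with
  | [] => [c]
  | v :: r => if v = 1 then runsP (c + 1) r else c :: runsP 0 r

-- A's per-line value (scan + final check) counts segments of length K
theorem lineA (K : Int) (line : List Int) : ∀ (c : Int),
    (if (line.foldl (s1 K) (0, c)).2 = K then (line.foldl (s1 K) (0, c)).1 + 1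
     else (line.foldl (s1 K) (0, c)).1) = ((runsP c line).count K : Int) := by
  induction line with
  | nil =>
    intro c
    by_cases h : c = K <;> simp [runsP, h, List.count_singleton]
  | cons v r ih =>
    intro c
    simp only [List.foldl_cons, runsP]
    by_cases hv : v = 1
    · simp only [s1, hv, if_true, eq_self_iff_true, if_pos]
      exact ih (c + 1)
    · have hs : s1 K (0, c) v = ((if c = K then 1 else 0 : Int), 0) := by
        simp [s1, hv]
      rw [if_neg hv, hs, foldl_s1_add]
      simp only [List.count_cons]
      split_ifs with h1 h2 <;> simp_all <;> push_cast <;> rw [← ih 0] <;> simp_all <;> omega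

theorem runsP_eq (line : List Int) : ∀ (c : Int),
    runsP c line =
      match line.drop (pvLead line) with
      | [] => [c + (pvLead line : Int)]
      | _ :: rest => (c + (pvLead line : Int)) :: runsP 0 rest := by
  induction line with
  | nil => intro c; simp [runsP, pvLead]
  | cons v r ih =>
    intro c
    by_cases hv : v = 1
    · subst hv
      simp only [runsP, pvLead, if_pos rfl]
      rw [ih (c + 1)]
      cases h : r.drop (pvLead r) <;> simp [h] <;> ring_nf
    · simp [runsP, pvLead, hv]

theorem runLengths_aux : ∀ (n : Nat) (line : List Int), line.length ≤ n → runLengths line = runsP 0 line := by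
  intro n
  induction n with
  | zero =>
    intro line h
    have : line = [] := List.eq_nil_of_length_eq_zero (Nat.le_zero.mp h)
    subst this
    rw [runLengths]
    simp [pvLead, runsP]
  | succ n ih =>
    intro line h
    rw [runLengths]
    by_cases hk : pvLead line = line.length
    · rw [if_pos hk, runsP_eq]
      have hnil : line.drop (pvLead line) = [] := by rw [hk]; simp
      rw [hnil]
      simp
    · rw [if_neg hk]
      have hlt : pvLead line < line.length := lt_of_le_of_ne (pvLead_le line) hk
      have hne : line.drop (pvLead line) ≠ [] := by
        simp [List.drop_eq_nil_iff]; omega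
      obtain ⟨v, rest, hvr⟩ := List.exists_cons_of_ne_nil hne
      have hdrop : line.drop (pvLead line + 1) = rest := by
        rw [← List.drop_drop]
        simp [hvr]
      have hlen : (line.drop (pvLead line + 1)).length ≤ n := by
        simp only [List.length_drop]; omega
      rw [ih _ hlen, hdrop]
      conv_rhs => rw [runsP_eq line, hvr]
      simp

theorem runLengths_eq_runsP (line : List Int) : runLengths line = runsP 0 line :=
  runLengths_aux line.length line le_rfl

-- A's per-line contribution
def lineVal (K : Int) (line : List Int) : Int :=
  if (line.foldl (s1 K) (0, 0)).2 = K then (line.foldl (s1 K) (0, 0)).1 + 1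
  else (line.foldl (s1 K) (0, 0)).1

-- decomposition of A's fused inner loop into two independent per-line scans
theorem inner_decomp (m : List (List Int)) (K i : Int) (js : List Int) : ∀ (t cx cy : Int),
    js.foldl (fun (st : Int × Int × Int) j =>
      let st1 := if pvIx m i j = 1 then (st.1, st.2.1 + 1, st.2.2)
                 else (if st.2.1 = K then st.1 + 1 else st.1, 0, st.2.2)
      if pvIx m j i = 1 then (st1.1, st1.2.1, st1.2.2 + 1)
      else (if st1.2.2 = K then st1.1 + 1 else st1.1, st1.2.1, 0)) (t, cx, cy) =
    (t + ((js.map (fun j => pvIx m i j)).foldl (s1 K) (0, cx)).1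
       + ((js.map (fun j => pvIx m j i)).foldl (s1 K) (0, cy)).1,
     ((js.map (fun j => pvIx m i j)).foldl (s1 K) (0, cx)).2,
     ((js.map (fun j => pvIx m j i)).foldl (s1 K) (0, cy)).2) := by
  induction js with
  | nil => intro t cx cy; simp
  | cons j js ih =>
    intro t cx cy
    simp only [List.foldl_cons, List.map_cons]
    rw [ih]
    rw [show (js.map (fun j => pvIx m i j)).foldl (s1 K) (s1 K (0, cx) (pvIx m i j)) =
          (js.map (fun j => pvIx m i j)).foldl (s1 K)
            ((s1 K (0, cx) (pvIx m i j)).1, (s1 K (0, cx) (pvIx m i j)).2) from rfl,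
        foldl_s1_add K (js.map (fun j => pvIx m i j)) (s1 K (0, cx) (pvIx m i j)).1
          (s1 K (0, cx) (pvIx m i j)).2]
    rw [show (js.map (fun j => pvIx m j i)).foldl (s1 K) (s1 K (0, cy) (pvIx m j i)) =
          (js.map (fun j => pvIx m j i)).foldl (s1 K)
            ((s1 K (0, cy) (pvIx m j i)).1, (s1 K (0, cy) (pvIx m j i)).2) from rfl,
        foldl_s1_add K (js.map (fun j => pvIx m j i)) (s1 K (0, cy) (pvIx m j i)).1
          (s1 K (0, cy) (pvIx m j i)).2]
    simp only [s1]
    split_ifs <;> simp [Prod.ext_iff] <;> ring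

-- ===== VERDICT (by name: the statement is the Claim_ definition above) =====
theorem check_spec : Claim_equal_check := by
  intro m N K _ _
  unfold Spec_check check check_alt
  set R := PySem.List.pyRange 0 N 1 with hR
  have hstep : ∀ (total i : Int),
      (fun total i =>
        let st := R.foldl (fun (st : Int × Int × Int) j =>
          let st1 := if pvIx m i j = 1 then (st.1, st.2.1 + 1, st.2.2)
                     else (if st.2.1 = K then st.1 + 1 else st.1, 0, st.2.2)
          if pvIx m j i = 1 then (st1.1, st1.2.1, st1.2.2 + 1)
          else (if st1.2.2 = K then st1.1 + 1 else st1.1, st1.2.1, 0)) (total, 0, 0)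
        let total := if st.2.1 = K then st.1 + 1 else st.1
        if st.2.2 = K then total + 1 else total) total i =
      total + lineVal K (R.map (fun j => pvIx m i j)) + lineVal K (R.map (fun j => pvIx m j i)) := by
    intro total i
    simp only [inner_decomp m K i R total 0 0, lineVal]
    split_ifs <;> ring
  calc R.foldl _ 0
      = R.foldl (fun total i =>
          total + lineVal K (R.map (fun j => pvIx m i j))
                + lineVal K (R.map (fun j => pvIx m j i))) 0 := by
        exact PySem.List.foldl_congr_mem _ _ _ _ (fun acc x _ => hstep acc x)
    _ = (R.map (fun i => lineVal K (R.map (fun j => pvIx m i j))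
               + lineVal K (R.map (fun j => pvIx m j i)))).sum := by
        rw [show (fun (total : Int) i =>
              total + lineVal K (R.map (fun j => pvIx m i j))
                    + lineVal K (R.map (fun j => pvIx m j i))) =
            (fun (total : Int) i =>
              total + (lineVal K (R.map (fun j => pvIx m i j))
                    + lineVal K (R.map (fun j => pvIx m j i)))) from by funext t i; ring]
        rw [PySem.List.foldl_add]; ring
    _ = ((R.map (fun i => R.map (fun j => pvIx m i j)) ++
          R.map (fun i => R.map (fun j => pvIx m j i))).foldl
            (fun total line => total + ((runLengths line).count K : Int)) 0) := by
        rw [PySem.List.foldl_add, List.map_append, List.sum_append, List.map_map, List.map_map]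
        have : ∀ line : List Int, ((runLengths line).count K : Int) = lineVal K line := by
          intro line
          rw [runLengths_eq_runsP, ← lineA K line 0, lineVal]
        simp only [Function.comp_def, this]
        rw [← List.sum_map_add]
        simp
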